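-- pv_equiv track=rewrite | github.com/JoliChen/py-tool | easy2/jonlin/utils/Text.py | last_find
-- ===== SOURCE A (Python) =====
-- def last_find(s, c, start=-1, end=0):
--     if start < 0:
--         start = len(s) + start
--         if start < 0:
--             return -1
--     if end < 0:
--         end = len(s) + end
--         if end < 0:
--             return -1
--     for i in range(start, end - 1, -1):
--         if s[i] == c:
--             return i
--     return -1
-- ===== SOURCE B (Python) =====
-- def last_find(s, c, start=-1, end=0):
--     n = len(s)
--     st = n + start if start < 0 else start
--     if st < 0:
--         return -1
--     en = n + end if end < 0 else end
--     if en < 0: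
--         return -1
--     res = -1
--     for i in range(en, st + 1):
--         if s[i] == c:
--             res = i
--     return res
-- ===== Notes on version B (the rewrite author's own statement) =====
-- stated objective: alternative
-- what changed: The backward early-return scan is replaced by a forward pass over the same index range keeping a running last-match accumulator (overwritten on each match), with the negative-index normalization factored into two guard-style returns.
import Mathlib
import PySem

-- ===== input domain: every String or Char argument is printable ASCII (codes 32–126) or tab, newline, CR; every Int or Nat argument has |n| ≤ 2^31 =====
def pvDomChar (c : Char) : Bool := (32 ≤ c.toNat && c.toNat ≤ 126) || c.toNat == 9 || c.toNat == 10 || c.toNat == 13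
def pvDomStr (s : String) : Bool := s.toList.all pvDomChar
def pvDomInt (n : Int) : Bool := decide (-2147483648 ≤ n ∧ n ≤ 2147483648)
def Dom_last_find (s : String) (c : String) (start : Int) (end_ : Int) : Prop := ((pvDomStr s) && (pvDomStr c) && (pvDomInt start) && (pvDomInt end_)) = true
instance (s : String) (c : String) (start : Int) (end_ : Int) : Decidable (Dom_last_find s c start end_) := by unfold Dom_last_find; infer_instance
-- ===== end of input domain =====

-- B replaces A's backward early-return scan by a forward pass keeping a running
-- last-match accumulator (objective: alternative decomposition, same cost).

-- ===== PORT A =====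
-- backward early-return loop: for i in range(start, end-1, -1): if s[i] == c: return i
def lfA_go (cs : List Char) (c : String) : List Int → Int
  | [] => -1
  | i :: rest =>
    match PySem.List.pyGet? cs i with
    | some ch => if c.toList = [ch] then i else lfA_go cs c rest
    | none => -1  -- IndexError in Python; excluded by Pre_last_find

-- the part of A after the 'start' normalization (end normalization + loop)
def lfA_after (cs : List Char) (c : String) (start : Int) (end_ : Int) : Int :=
  if end_ < 0 then
    (if (cs.length : Int) + end_ < 0 then -1
     else lfA_go cs c (PySem.List.pyRange start ((cs.length : Int) + end_ - 1) (-1)))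
  else lfA_go cs c (PySem.List.pyRange start (end_ - 1) (-1))

def last_find (s : String) (c : String) (start : Int) (end_ : Int) : Int :=
  if start < 0 then
    (if (s.toList.length : Int) + start < 0 then -1
     else lfA_after s.toList c ((s.toList.length : Int) + start) end_)
  else lfA_after s.toList c start end_

-- ===== PORT B =====
-- one forward step: on a match overwrite the accumulator with the index
def lfB_step (cs : List Char) (c : String) (res : Int) (i : Int) : Int :=
  match PySem.List.pyGet? cs i with
  | some ch => if c.toList = [ch] then i else res
  | none => res  -- IndexError in Python; excluded by Pre_last_find

-- body of B after computing the normalized bounds st, en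
def lfB_main (cs : List Char) (c : String) (st : Int) (en : Int) : Int :=
  if st < 0 then -1
  else if en < 0 then -1
  else (PySem.List.pyRange en (st + 1) 1).foldl (lfB_step cs c) (-1)

def last_find_alt (s : String) (c : String) (start : Int) (end_ : Int) : Int :=
  lfB_main s.toList c
    (if start < 0 then (s.toList.length : Int) + start else start)
    (if end_ < 0 then (s.toList.length : Int) + end_ else end_)

-- ===== PRECONDITION & SPEC =====
-- Pre_ excludes exactly the inputs where Python A raises IndexError: after the
-- negative-index normalization, the scanned range is nonempty and its top index
-- start' lies at or beyond len(s) (both A and B probe s[i] there and raise).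
def Pre_last_find (s : String) (c : String) (start : Int) (end_ : Int) : Prop :=
  (if start < 0 then (s.toList.length : Int) + start else start) < 0 ∨
  (if end_ < 0 then (s.toList.length : Int) + end_ else end_) < 0 ∨
  (if start < 0 then (s.toList.length : Int) + start else start) <
    (if end_ < 0 then (s.toList.length : Int) + end_ else end_) ∨
  (if start < 0 then (s.toList.length : Int) + start else start) < (s.toList.length : Int)
instance (s : String) (c : String) (start : Int) (end_ : Int) : Decidable (Pre_last_find s c start end_) := by unfold Pre_last_find; infer_instance

def pvWitness_last_find : String × String × Int × Int := ("abcba", "b", -1, 0)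

def Spec_last_find (s : String) (c : String) (start : Int) (end_ : Int) (out : Int) : Prop := out = last_find_alt s c start end_
instance (s : String) (c : String) (start : Int) (end_ : Int) (out : Int) : Decidable (Spec_last_find s c start end_ out) := by unfold Spec_last_find; infer_instance

-- ===== CLAIM (what is proved, stated in full; the proofs are below) =====
def Claim_equal_last_find : Prop := ∀ (s : String) (c : String) (start : Int) (end_ : Int), Dom_last_find s c start end_ → Pre_last_find s c start end_ → Spec_last_find s c start end_ (last_find s c start end_)

-- ===== LEMMAS AND PROOFS =====

-- backward first-match equals forward fold with an overwriting accumulator,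
-- provided every scanned index is in range
lemma lfA_go_eq_foldl_reverse (cs : List Char) (c : String) :
    ∀ l : List Int, (∀ i ∈ l, 0 ≤ i ∧ i < (cs.length : Int)) →
      lfA_go cs c l = l.reverse.foldl (lfB_step cs c) (-1) := by
  intro l
  induction l with
  | nil => intro _; simp [lfA_go]
  | cons i rest ih =>
    intro hv
    obtain ⟨h0, h1⟩ := hv i (by simp)
    have hget : PySem.List.pyGet? cs i = some (cs[i.toNat]) :=
      PySem.List.pyGet?_eq_some_getElem cs h0 h1
    have hrest : ∀ j ∈ rest, 0 ≤ j ∧ j < (cs.length : Int) := fun j hj => hv j (by simp [hj])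
    simp only [lfA_go, hget, List.reverse_cons, List.foldl_append, List.foldl_cons,
      List.foldl_nil, lfB_step]
    by_cases hc : c.toList = [cs[i.toNat]]
    · simp [hc]
    · simp [hc, ih hrest]

-- the countdown range A scans is the reverse of the forward range B scans
lemma range_rev (st en : Int) :
    PySem.List.pyRange st (en - 1) (-1) = (PySem.List.pyRange en (st + 1) 1).reverse := by
  rw [PySem.List.pyRange_neg_one_eq_reverse]
  have h : en - 1 + 1 = en := by ring
  rw [h]

-- the core equality after normalization
lemma core_eq (cs : List Char) (c : String) (st en : Int)
    (hen : 0 ≤ en) (h : st < en ∨ st < (cs.length : Int)) :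
    lfA_go cs c (PySem.List.pyRange st (en - 1) (-1)) =
      (PySem.List.pyRange en (st + 1) 1).foldl (lfB_step cs c) (-1) := by
  have hv : ∀ i ∈ PySem.List.pyRange st (en - 1) (-1), 0 ≤ i ∧ i < (cs.length : Int) := by
    intro i hi
    rw [PySem.List.mem_pyRange_neg_one] at hi
    rcases h with h | h <;> omega
  rw [lfA_go_eq_foldl_reverse cs c _ hv, range_rev, List.reverse_reverse]

-- ===== VERDICT (by name: the statement is the Claim_ definition above) =====
theorem last_find_spec : Claim_equal_last_find := by
  intro s c start end_ _ hpre
  unfold Spec_last_find Pre_last_find at *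
  unfold last_find last_find_alt lfA_after lfB_main
  split_ifs at hpre ⊢ <;>
    first
      | rfl
      | omega
      | (apply core_eq <;> omega)
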